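-- pv_equiv track=rewrite | github.com/Darqhan/PythonGCSE_Hun | 31_otszaz.py | ertek
-- ===== SOURCE A (Python) =====
-- def ertek(darab):
--     aruk_ara = 0
--     for i in range(1,darab+1):
--         aruk_ara+=400
--         if (i==1):
--             aruk_ara+=100
--         elif (i==2):
--             aruk_ara+=50
--     return aruk_ara
-- ===== SOURCE B (Python) =====
-- def ertek(darab):
--     return 400 * max(darab, 0) + (100 if darab >= 1 else 0) + (50 if darab >= 2 else 0)
-- ===== Notes on version B (the rewrite author's own statement) =====
-- stated objective: faster
-- what changed: Replaces the per-item accumulation loop with a closed-form arithmetic expression (400 per item plus the one-off 100 and 50 bonuses).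
import Mathlib
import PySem

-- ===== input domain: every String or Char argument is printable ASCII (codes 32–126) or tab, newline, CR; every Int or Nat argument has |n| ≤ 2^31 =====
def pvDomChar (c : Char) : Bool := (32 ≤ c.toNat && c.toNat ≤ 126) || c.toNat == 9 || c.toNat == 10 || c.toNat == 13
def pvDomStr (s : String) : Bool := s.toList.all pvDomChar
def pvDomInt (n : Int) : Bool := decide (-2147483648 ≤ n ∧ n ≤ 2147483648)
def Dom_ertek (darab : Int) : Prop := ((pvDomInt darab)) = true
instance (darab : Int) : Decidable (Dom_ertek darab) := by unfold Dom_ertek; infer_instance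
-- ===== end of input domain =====

-- B replaces A's per-item loop with a closed-form expression; objective: faster (O(1) vs O(n)).

-- ===== PORT A =====
-- literal port of A's loop over range(1, darab+1)
def ertek (darab : Int) : Int :=
  (PySem.List.pyRange 1 (darab + 1) 1).foldl
    (fun aruk_ara i =>
      let aruk_ara := aruk_ara + 400
      if i = 1 then aruk_ara + 100
      else if i = 2 then aruk_ara + 50
      else aruk_ara)
    0

-- ===== PORT B =====
def ertek_alt (darab : Int) : Int :=
  400 * max darab 0 + (if 1 ≤ darab then 100 else 0) + (if 2 ≤ darab then 50 else 0)

-- ===== PRECONDITION & SPEC =====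
def Spec_ertek (darab : Int) (out : Int) : Prop := out = ertek_alt darab
instance (darab : Int) (out : Int) : Decidable (Spec_ertek darab out) := by unfold Spec_ertek; infer_instance

-- ===== CLAIM (what is proved, stated in full; the proofs are below) =====
def Claim_equal_ertek : Prop := ∀ (darab : Int), Dom_ertek darab → Spec_ertek darab (ertek darab)

-- ===== LEMMAS AND PROOFS =====

def pvStep (aruk_ara i : Int) : Int :=
  let aruk_ara := aruk_ara + 400
  if i = 1 then aruk_ara + 100
  else if i = 2 then aruk_ara + 50
  else aruk_ara

def pvG (i : Int) : Int := 400 + (if i = 1 then 100 else if i = 2 then 50 else 0)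

theorem pv_foldl_eq (l : List Int) (acc : Int) :
    l.foldl pvStep acc = acc + (l.map pvG).sum := by
  induction l generalizing acc with
  | nil => simp
  | cons x xs ih =>
      simp only [List.foldl_cons, List.map_cons, List.sum_cons, ih]
      simp only [pvStep, pvG]
      split_ifs <;> ring

theorem pv_sum_range (n : Nat) :
    ((List.range n).map (fun (k : Nat) => pvG (1 + (k : Int)))).sum =
      400 * n + (if 1 ≤ n then 100 else 0) + (if 2 ≤ n then 50 else 0) := by
  induction n with
  | zero => simp
  | succ m ih =>
      rw [List.range_succ, List.map_append, List.sum_append, ih]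
      simp only [List.map_cons, List.map_nil, List.sum_cons, List.sum_nil, pvG]
      rcases m with _ | _ | m
      · norm_num
      · norm_num
      · have h1 : ¬ ((1:Int) + (m + 1 + 1 : Nat) = 1) := by push_cast; omega
        have h2 : ¬ ((1:Int) + (m + 1 + 1 : Nat) = 2) := by push_cast; omega
        rw [if_neg h1, if_neg h2]
        push_cast
        ring

-- ===== VERDICT (by name: the statement is the Claim_ definition above) =====
theorem ertek_spec : Claim_equal_ertek := by
  intro darab _
  show ertek darab = ertek_alt darab
  unfold ertek ertek_alt
  rw [show (fun aruk_ara i =>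
      let aruk_ara := aruk_ara + 400
      if i = 1 then aruk_ara + 100
      else if i = 2 then aruk_ara + 50
      else aruk_ara) = pvStep from rfl]
  rw [pv_foldl_eq, PySem.List.pyRange_one]
  rw [List.map_map]
  simp only [Function.comp_def, zero_add]
  rw [pv_sum_range (darab + 1 - 1).toNat]
  have hmax : ((darab + 1 - 1).toNat : Int) = max darab 0 := by omega
  rw [hmax]
  split_ifs <;> omega
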